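-- pv_equiv track=rewrite | github.com/szkotgh/sierpinski-python | main.py | level_up
-- ===== SOURCE A (Python) =====
-- def level_up(arr):
--     old_size = len(arr[0])
--     new_size = len(arr[0])*3
--     new_arr = [[False] * new_size for _ in range(new_size)]
--
--     for nx in range(3):
--         for ny in range(3):
--             for ox in range(old_size):
--                 for oy in range(old_size):
--                     if nx == 1 and ny == 1: continue
--                     new_arr[(old_size*nx)+ox][(old_size*ny)+oy] = arr[ox][oy]
--
--     return new_arr
-- ===== SOURCE B (Python) =====
-- def level_up(arr):
--     n = len(arr[0])
--     rows = [[arr[ox][oy] for oy in range(n)] for ox in range(n)]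
--     out = []
--     for row in rows:
--         out.append(row + row + row)
--     for row in rows:
--         out.append(row + [False] * n + row)
--     for row in rows:
--         out.append(row + row + row)
--     return out
-- ===== Notes on version B (the rewrite author's own statement) =====
-- stated objective: faster
-- what changed: Replaces the preallocated 3n x 3n matrix filled by four nested loops with per-cell block-index arithmetic (and a centre-skip branch tested per cell) by building the result row-by-row: extract the n source rows once, then emit the top, middle (blank centre) and bottom row groups by list concatenation.
import Mathlib
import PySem

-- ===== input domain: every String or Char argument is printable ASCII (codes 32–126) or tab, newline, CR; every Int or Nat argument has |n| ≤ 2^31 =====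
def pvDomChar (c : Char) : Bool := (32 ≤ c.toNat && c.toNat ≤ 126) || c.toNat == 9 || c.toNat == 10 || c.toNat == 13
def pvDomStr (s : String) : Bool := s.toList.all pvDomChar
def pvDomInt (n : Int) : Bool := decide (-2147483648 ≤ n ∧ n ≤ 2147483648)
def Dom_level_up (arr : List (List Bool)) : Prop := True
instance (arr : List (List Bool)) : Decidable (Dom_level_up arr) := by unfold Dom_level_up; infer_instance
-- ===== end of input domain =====

-- B builds the tripled grid row-by-row (extract the n source rows once, then three
-- row groups by concatenation) instead of A's preallocated matrix with a
-- 4-deep block-index write loop and a centre-skip branch; measured faster in a timing run.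

-- ===== PORT A =====
-- literal transliteration: the four nested for-loops become nested foldls over ranges,
-- the in-place cell assignment becomes List.set of the addressed row/column.
def level_up (arr : List (List Bool)) : List (List Bool) :=
  let old_size := (arr.getD 0 []).length
  let new_size := (arr.getD 0 []).length * 3
  let new_arr := List.replicate new_size (List.replicate new_size false)
  (List.range 3).foldl (fun acc nx =>
    (List.range 3).foldl (fun acc ny =>
      (List.range old_size).foldl (fun acc ox =>
        (List.range old_size).foldl (fun acc oy =>
          if nx == 1 && ny == 1 then acc
          else acc.set (old_size * nx + ox)
                 ((acc.getD (old_size * nx + ox) []).set (old_size * ny + oy)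
                   ((arr.getD ox []).getD oy false))) acc) acc) acc) new_arr

-- ===== PORT B =====
def level_up_alt (arr : List (List Bool)) : List (List Bool) :=
  let n := (arr.getD 0 []).length
  let rows := (List.range n).map (fun ox => (List.range n).map (fun oy => (arr.getD ox []).getD oy false))
  (rows.map (fun row => row ++ row ++ row))
    ++ (rows.map (fun row => row ++ List.replicate n false ++ row))
    ++ (rows.map (fun row => row ++ row ++ row))

-- ===== PRECONDITION & SPEC =====
-- Pre_ excludes exactly the inputs where Python A raises (IndexError): the empty list
-- (arr[0]), and inputs where some of the first len(arr[0]) rows are missing or shorter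
-- than len(arr[0]); Python B raises on exactly the same inputs.
def Pre_level_up (arr : List (List Bool)) : Prop :=
  arr ≠ [] ∧ (arr.headD []).length ≤ arr.length ∧
    ∀ r ∈ arr.take (arr.headD []).length, (arr.headD []).length ≤ r.length
instance (arr : List (List Bool)) : Decidable (Pre_level_up arr) := by unfold Pre_level_up; infer_instance
def pvWitness_level_up : List (List Bool) := [[true, false], [false, true]]

def Spec_level_up (arr : List (List Bool)) (out : List (List Bool)) : Prop := out = level_up_alt arr
instance (arr : List (List Bool)) (out : List (List Bool)) : Decidable (Spec_level_up arr out) := by unfold Spec_level_up; infer_instance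

-- ===== CLAIM (what is proved, stated in full; the proofs are below) =====
def Claim_equal_level_up : Prop := ∀ (arr : List (List Bool)), Dom_level_up arr → Pre_level_up arr → Spec_level_up arr (level_up arr)

-- ===== LEMMAS AND PROOFS =====

theorem pv_foldl_id {α β : Type} (l : List β) (m : α) : l.foldl (fun a _ => a) m = m := by
  induction l generalizing m with
  | nil => rfl
  | cons b l ih => simpa using ih m

theorem pv_foldl_set_same {α : Type} (d : α) (G : Nat → α → α) (l : List Nat) (m : List α)
    (i : Nat) (hi : i < m.length) :
    l.foldl (fun acc j => acc.set i (G j (acc.getD i d))) m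
      = m.set i (l.foldl (fun r j => G j r) (m.getD i d)) := by
  induction l generalizing m with
  | nil => simp [List.getD_eq_getElem?_getD, List.getElem?_eq_getElem hi]
  | cons j l ih =>
    simp only [List.foldl_cons]
    rw [ih _ (by simpa using hi)]
    simp [List.set_set, List.getD_eq_getElem?_getD, List.getElem?_set_self hi]

theorem pv_foldl_set_range {α : Type} (v : Nat → α) (b k : Nat) (r : List α)
    (h : b + k ≤ r.length) :
    (List.range k).foldl (fun r i => r.set (b + i) (v i)) r
      = r.take b ++ (List.range k).map v ++ r.drop (b + k) := by
  induction k with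
  | zero => simp [List.take_append_drop]
  | succ k ih =>
    rw [List.range_succ, List.foldl_append, ih (by omega)]
    simp only [List.foldl_cons, List.foldl_nil, List.map_append, List.map_cons, List.map_nil]
    have hb : b ≤ r.length := by omega
    have hbk : b + k < r.length := by omega
    rw [List.set_append]
    simp only [List.length_take, List.length_append, List.length_map, List.length_range, min_eq_left hb]
    rw [if_neg (by omega)]
    rw [show b + k - (b + k) = 0 by omega, List.drop_eq_getElem_cons hbk, List.set_cons_zero,
        show b + (k + 1) = b + k + 1 from rfl]
    simp [List.append_assoc]

theorem pv_block (n b c : Nat) (a : Nat → Nat → Bool) (m : List (List Bool)) (k : Nat)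
    (h : b + k ≤ m.length) :
    (List.range k).foldl (fun acc ox =>
        (List.range n).foldl (fun acc oy =>
          acc.set (b + ox) ((acc.getD (b + ox) []).set (c + oy) (a ox oy))) acc) m
      = m.take b ++ (List.range k).map (fun ox =>
          (List.range n).foldl (fun r oy => r.set (c + oy) (a ox oy)) (m.getD (b + ox) []))
        ++ m.drop (b + k) := by
  induction k with
  | zero => simp [List.take_append_drop]
  | succ k ih =>
    rw [List.range_succ, List.foldl_append, ih (by omega)]
    simp only [List.foldl_cons, List.foldl_nil, List.map_append, List.map_cons, List.map_nil]
    have hb : b ≤ m.length := by omega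
    have hbk : b + k < m.length := by omega
    set Mk := m.take b ++ (List.range k).map (fun ox =>
          (List.range n).foldl (fun r oy => r.set (c + oy) (a ox oy)) (m.getD (b + ox) []))
        ++ m.drop (b + k) with hMk
    have hget : Mk.getD (b + k) [] = m.getD (b + k) [] := by
      rw [hMk, List.getD_eq_getElem?_getD,
          List.getElem?_append_right (by simp [min_eq_left hb])]
      simp [min_eq_left hb, List.getD_eq_getElem?_getD]
    rw [pv_foldl_set_same [] (fun oy r => r.set (c + oy) (a k oy)) (List.range n) Mk (b + k)
          (by simp [hMk, min_eq_left hb]; omega), hget]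
    rw [hMk, List.set_append]
    simp only [List.length_take, List.length_append, List.length_map, List.length_range, min_eq_left hb]
    rw [if_neg (by omega)]
    rw [show b + k - (b + k) = 0 by omega, List.drop_eq_getElem_cons hbk, List.set_cons_zero,
        show b + (k + 1) = b + k + 1 from rfl]
    simp [List.append_assoc, List.getD_eq_getElem?_getD]

theorem pv_take2 {α : Type} {n : Nat} (A B C : List α) (hA : A.length = n) (hB : B.length = n) :
    (A ++ (B ++ C)).take (n + n) = A ++ B := by
  rw [List.take_append, List.take_of_length_le (by omega), show n + n - A.length = n by omega,
      List.take_left' hB]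
theorem pv_drop2 {α : Type} {n : Nat} (A B C : List α) (hA : A.length = n) (hB : B.length = n) :
    (A ++ (B ++ C)).drop (n + n) = C := by
  rw [List.drop_append, List.drop_eq_nil_of_le (by omega), show n + n - A.length = n by omega,
      List.nil_append, List.drop_left' hB]
theorem pv_drop3 {α : Type} {n : Nat} (A B C : List α) (hA : A.length = n) (hB : B.length = n)
    (hC : C.length = n) : (A ++ (B ++ C)).drop (n + n + n) = [] := by
  rw [List.drop_append, List.drop_eq_nil_of_le (by omega), List.nil_append,
      List.drop_append, List.drop_eq_nil_of_le (by omega), List.nil_append,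
      List.drop_eq_nil_of_le (by omega)]
theorem pv_getD_right {α : Type} {n ox : Nat} (A B : List α) (d : α) (hA : A.length = n) :
    (A ++ B).getD (n + ox) d = B.getD ox d := by
  rw [List.getD_append_right _ _ _ _ (by omega)]; congr 1; omega
theorem pv_getD_map_range {α : Type} {n ox : Nat} (f : Nat → α) (d : α) (h : ox < n) :
    ((List.range n).map f).getD ox d = f ox := by
  rw [List.getD_eq_getElem?_getD, List.getElem?_map, List.getElem?_range h]; rfl

-- row patches: rewrite chunk 0 / 1 / 2 of a row made of three chunks of length n
theorem pv_row0 {n : Nat} (g : Nat → Bool) (u v w : List Bool) (hu : u.length = n) :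
    (List.range n).foldl (fun r oy => r.set oy (g oy)) (u ++ (v ++ w))
      = (List.range n).map g ++ (v ++ w) := by
  have h := pv_foldl_set_range g 0 n (u ++ (v ++ w)) (by simp; omega)
  simp only [Nat.zero_add] at h
  rw [h, List.take_zero, List.nil_append, List.drop_left' hu]
theorem pv_row1 {n : Nat} (g : Nat → Bool) (u v w : List Bool) (hu : u.length = n)
    (hv : v.length = n) :
    (List.range n).foldl (fun r oy => r.set (n + oy) (g oy)) (u ++ (v ++ w))
      = u ++ ((List.range n).map g ++ w) := by
  rw [pv_foldl_set_range g n n _ (by simp; omega), List.take_left' hu, pv_drop2 u v w hu hv,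
      List.append_assoc]
theorem pv_row2 {n : Nat} (g : Nat → Bool) (u v w : List Bool) (hu : u.length = n)
    (hv : v.length = n) (hw : w.length = n) :
    (List.range n).foldl (fun r oy => r.set (n + n + oy) (g oy)) (u ++ (v ++ w))
      = u ++ (v ++ (List.range n).map g) := by
  rw [pv_foldl_set_range g (n + n) n _ (by simp; omega), pv_take2 u v w hu hv,
      pv_drop3 u v w hu hv hw]
  simp [List.append_assoc]

-- segment rewrites: one (nx,ny) block of A on a matrix of three segments of length n
theorem pv_seg0 {n : Nat} (c : Nat) (a : Nat → Nat → Bool) (P Q S : List (List Bool))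
    (hP : P.length = n) :
    (List.range n).foldl (fun acc ox =>
        (List.range n).foldl (fun acc oy =>
          acc.set ox ((acc.getD ox []).set (c + oy) (a ox oy))) acc) (P ++ (Q ++ S))
      = (List.range n).map (fun ox =>
          (List.range n).foldl (fun r oy => r.set (c + oy) (a ox oy)) (P.getD ox []))
        ++ (Q ++ S) := by
  have h := pv_block n 0 c a (P ++ (Q ++ S)) n (by simp; omega)
  simp only [Nat.zero_add] at h
  rw [h, List.take_zero, List.nil_append, List.drop_left' hP]
  rw [List.map_congr_left (fun ox hox => by
    rw [List.getD_append _ _ _ ox (by rw [hP]; exact List.mem_range.mp hox)])]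
theorem pv_seg1 {n : Nat} (c : Nat) (a : Nat → Nat → Bool) (P Q S : List (List Bool))
    (hP : P.length = n) (hQ : Q.length = n) :
    (List.range n).foldl (fun acc ox =>
        (List.range n).foldl (fun acc oy =>
          acc.set (n + ox) ((acc.getD (n + ox) []).set (c + oy) (a ox oy))) acc) (P ++ (Q ++ S))
      = P ++ ((List.range n).map (fun ox =>
          (List.range n).foldl (fun r oy => r.set (c + oy) (a ox oy)) (Q.getD ox []))
        ++ S) := by
  rw [pv_block n n c a (P ++ (Q ++ S)) n (by simp; omega), List.take_left' hP,
      pv_drop2 P Q S hP hQ]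
  rw [List.map_congr_left (fun ox hox => by
    rw [pv_getD_right P (Q ++ S) [] hP,
        List.getD_append _ _ _ ox (by rw [hQ]; exact List.mem_range.mp hox)])]
  rw [List.append_assoc]
theorem pv_seg2 {n : Nat} (c : Nat) (a : Nat → Nat → Bool) (P Q S : List (List Bool))
    (hP : P.length = n) (hQ : Q.length = n) (hS : S.length = n) :
    (List.range n).foldl (fun acc ox =>
        (List.range n).foldl (fun acc oy =>
          acc.set (n + n + ox) ((acc.getD (n + n + ox) []).set (c + oy) (a ox oy))) acc)
        (P ++ (Q ++ S))
      = P ++ (Q ++ (List.range n).map (fun ox =>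
          (List.range n).foldl (fun r oy => r.set (c + oy) (a ox oy)) (S.getD ox []))) := by
  have h := pv_block n (n + n) c a (P ++ (Q ++ S)) n (by simp; omega)
  simp only [Nat.add_assoc] at h
  rw [show (fun (acc : List (List Bool)) (ox : Nat) =>
        (List.range n).foldl (fun acc oy =>
          acc.set (n + n + ox) ((acc.getD (n + n + ox) []).set (c + oy) (a ox oy))) acc)
      = (fun acc ox =>
        (List.range n).foldl (fun acc oy =>
          acc.set (n + (n + ox)) ((acc.getD (n + (n + ox)) []).set (c + oy) (a ox oy))) acc) from by
    funext acc ox; simp [Nat.add_assoc]]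
  rw [h]
  rw [show n + (n + n) = n + n + n from by omega, pv_drop3 P Q S hP hQ hS,
      show (List.take (n + n) (P ++ (Q ++ S))) = P ++ Q from pv_take2 P Q S hP hQ]
  rw [List.map_congr_left (fun ox hox => by
    rw [pv_getD_right P (Q ++ S) [] hP, pv_getD_right Q S [] hQ])]
  simp [List.append_assoc]

theorem pv_main (n : Nat) (a : Nat → Nat → Bool) :
    (List.range 3).foldl (fun acc nx =>
      (List.range 3).foldl (fun acc ny =>
        (List.range n).foldl (fun acc ox =>
          (List.range n).foldl (fun acc oy =>
            if nx == 1 && ny == 1 then acc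
            else acc.set (n * nx + ox) ((acc.getD (n * nx + ox) []).set (n * ny + oy) (a ox oy))) acc) acc) acc)
      (List.replicate (n * 3) (List.replicate (n * 3) false))
    = ((List.range n).map (fun ox => (List.range n).map (fun oy => a ox oy))).map (fun row => row ++ row ++ row)
      ++ ((List.range n).map (fun ox => (List.range n).map (fun oy => a ox oy))).map (fun row => row ++ List.replicate n false ++ row)
      ++ ((List.range n).map (fun ox => (List.range n).map (fun oy => a ox oy))).map (fun row => row ++ row ++ row) := by
  rw [show (List.range 3) = [0, 1, 2] from rfl]
  simp only [List.foldl_cons, List.foldl_nil]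
  simp only [Nat.mul_zero, Nat.zero_add, Nat.mul_one,
    show ((0 : Nat) == 1 && (0 : Nat) == 1) = false from rfl,
    show ((0 : Nat) == 1 && (1 : Nat) == 1) = false from rfl,
    show ((0 : Nat) == 1 && (2 : Nat) == 1) = false from rfl,
    show ((1 : Nat) == 1 && (0 : Nat) == 1) = false from rfl,
    show ((1 : Nat) == 1 && (1 : Nat) == 1) = true from rfl,
    show ((1 : Nat) == 1 && (2 : Nat) == 1) = false from rfl,
    show ((2 : Nat) == 1 && (0 : Nat) == 1) = false from rfl,
    show ((2 : Nat) == 1 && (1 : Nat) == 1) = false from rfl,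
    show ((2 : Nat) == 1 && (2 : Nat) == 1) = false from rfl,
    Bool.false_eq_true, if_false, if_true]
  simp only [show n * 2 = n + n from by ring, show n * 3 = n + (n + n) from by ring,
    List.replicate_add]

  set zc := List.replicate n false with hzc
  set zr := zc ++ (zc ++ zc) with hzr
  set Z := List.replicate n zr with hZ
  have hZl : Z.length = n := by simp [hZ]
  have hzcl : zc.length = n := by simp [hzc]
  -- (0,0)
  have h1 := pv_seg0 (n := n) 0 a Z Z Z hZl
  simp only [Nat.zero_add] at h1
  rw [h1, show (List.range n).map (fun ox => (List.range n).foldl (fun r oy => r.set oy (a ox oy)) (Z.getD ox []))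
      = (List.range n).map (fun ox => (List.range n).map (a ox) ++ (zc ++ zc)) from
    List.map_congr_left (fun ox hox => by
      rw [hZ, List.getD_replicate _ (List.mem_range.mp hox), hzr, pv_row0 (a ox) zc zc zc hzcl])]
  -- (0,1)
  rw [pv_seg0 (n := n) n a _ Z Z (by simp), show (List.range n).map (fun ox =>
        (List.range n).foldl (fun r oy => r.set (n + oy) (a ox oy))
          (((List.range n).map (fun ox => (List.range n).map (a ox) ++ (zc ++ zc))).getD ox []))
      = (List.range n).map (fun ox => (List.range n).map (a ox) ++ ((List.range n).map (a ox) ++ zc)) from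
    List.map_congr_left (fun ox hox => by
      rw [pv_getD_map_range _ _ (List.mem_range.mp hox),
          pv_row1 (a ox) _ zc zc (by simp) hzcl])]
  -- (0,2)
  rw [pv_seg0 (n := n) (n + n) a _ Z Z (by simp), show (List.range n).map (fun ox =>
        (List.range n).foldl (fun r oy => r.set (n + n + oy) (a ox oy))
          (((List.range n).map (fun ox => (List.range n).map (a ox) ++ ((List.range n).map (a ox) ++ zc))).getD ox []))
      = (List.range n).map (fun ox => (List.range n).map (a ox) ++ ((List.range n).map (a ox) ++ (List.range n).map (a ox))) from
    List.map_congr_left (fun ox hox => by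
      rw [pv_getD_map_range _ _ (List.mem_range.mp hox),
          pv_row2 (a ox) _ _ zc (by simp) (by simp) hzcl])]
  -- (1,0)
  have h4 := pv_seg1 (n := n) 0 a
      ((List.range n).map (fun ox => (List.range n).map (a ox) ++ ((List.range n).map (a ox) ++ (List.range n).map (a ox))))
      Z Z (by simp) hZl
  simp only [Nat.zero_add] at h4
  rw [h4, show (List.range n).map (fun ox => (List.range n).foldl (fun r oy => r.set oy (a ox oy)) (Z.getD ox []))
      = (List.range n).map (fun ox => (List.range n).map (a ox) ++ (zc ++ zc)) from
    List.map_congr_left (fun ox hox => by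
      rw [hZ, List.getD_replicate _ (List.mem_range.mp hox), hzr, pv_row0 (a ox) zc zc zc hzcl])]
  -- (1,1): the skipped centre block is a fold of the identity
  simp only [pv_foldl_id]
  -- (1,2)
  rw [pv_seg1 (n := n) (n + n) a _ _ Z (by simp) (by simp), show (List.range n).map (fun ox =>
        (List.range n).foldl (fun r oy => r.set (n + n + oy) (a ox oy))
          (((List.range n).map (fun ox => (List.range n).map (a ox) ++ (zc ++ zc))).getD ox []))
      = (List.range n).map (fun ox => (List.range n).map (a ox) ++ (zc ++ (List.range n).map (a ox))) from
    List.map_congr_left (fun ox hox => by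
      rw [pv_getD_map_range _ _ (List.mem_range.mp hox),
          pv_row2 (a ox) _ zc zc (by simp) hzcl hzcl])]
  -- (2,0)
  have h6 := pv_seg2 (n := n) 0 a
      ((List.range n).map (fun ox => (List.range n).map (a ox) ++ ((List.range n).map (a ox) ++ (List.range n).map (a ox))))
      ((List.range n).map (fun ox => (List.range n).map (a ox) ++ (zc ++ (List.range n).map (a ox))))
      Z (by simp) (by simp) hZl
  simp only [Nat.zero_add] at h6
  rw [h6, show (List.range n).map (fun ox => (List.range n).foldl (fun r oy => r.set oy (a ox oy)) (Z.getD ox []))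
      = (List.range n).map (fun ox => (List.range n).map (a ox) ++ (zc ++ zc)) from
    List.map_congr_left (fun ox hox => by
      rw [hZ, List.getD_replicate _ (List.mem_range.mp hox), hzr, pv_row0 (a ox) zc zc zc hzcl])]
  -- (2,1)
  rw [pv_seg2 (n := n) n a _ _ _ (by simp) (by simp) (by simp), show (List.range n).map (fun ox =>
        (List.range n).foldl (fun r oy => r.set (n + oy) (a ox oy))
          (((List.range n).map (fun ox => (List.range n).map (a ox) ++ (zc ++ zc))).getD ox []))
      = (List.range n).map (fun ox => (List.range n).map (a ox) ++ ((List.range n).map (a ox) ++ zc)) from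
    List.map_congr_left (fun ox hox => by
      rw [pv_getD_map_range _ _ (List.mem_range.mp hox),
          pv_row1 (a ox) _ zc zc (by simp) hzcl])]
  -- (2,2)
  rw [pv_seg2 (n := n) (n + n) a _ _ _ (by simp) (by simp) (by simp), show (List.range n).map (fun ox =>
        (List.range n).foldl (fun r oy => r.set (n + n + oy) (a ox oy))
          (((List.range n).map (fun ox => (List.range n).map (a ox) ++ ((List.range n).map (a ox) ++ zc))).getD ox []))
      = (List.range n).map (fun ox => (List.range n).map (a ox) ++ ((List.range n).map (a ox) ++ (List.range n).map (a ox))) from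
    List.map_congr_left (fun ox hox => by
      rw [pv_getD_map_range _ _ (List.mem_range.mp hox),
          pv_row2 (a ox) _ _ zc (by simp) (by simp) hzcl])]
  simp [List.map_map, Function.comp_def, List.append_assoc]

-- ===== VERDICT (by name: the statement is the Claim_ definition above) =====
theorem level_up_spec : Claim_equal_level_up := by
  intro arr _ _
  unfold Spec_level_up level_up level_up_alt
  exact pv_main (arr.getD 0 []).length (fun ox oy => (arr.getD ox []).getD oy false)
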